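-- pv_equiv track=rewrite | github.com/wwan-dev/FIT5136_deadline | src/utils/date_util.py | time_slots_to_hex
-- ===== SOURCE A (Python) =====
-- from typing import List, Dict, Tuple
--
-- def time_slots_to_hex(time_slots: List[int]) -> str:
--     """Convert time slot list to hexadecimal string
--
--     Args:
--         time_slots (List[int]): List of time slot indices (1-16)
--
--     Returns:
--         str: Hexadecimal string
--     """
--     if not time_slots:
--         return "0"
--
--     value = 0
--     for slot in time_slots:
--         if 1 <= slot <= 16:
--             # Since time slots are 1-16 and bits are 0-15, need to subtract 1
--             value |= (1 << (slot - 1))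
--
--     return format(value, 'x')
-- ===== SOURCE B (Python) =====
-- from typing import List
--
-- def time_slots_to_hex(time_slots: List[int]) -> str:
--     """Convert time slot list to hexadecimal string (bit-array decomposition)."""
--     bits = [False] * 16
--     for slot in time_slots:
--         if 1 <= slot <= 16:
--             bits[slot - 1] = True
--     value = 0
--     for bit in reversed(bits):
--         value = value * 2 + (1 if bit else 0)
--     return format(value, 'x')
-- ===== Notes on version B (the rewrite author's own statement) =====
-- stated objective: alternative
-- what changed: Instead of OR-ing shifted bit values into an integer with an empty-list guard, B marks a 16-entry boolean array per slot and then folds the array high-to-low into the integer, dropping the redundant empty guard since 0 already formats to '0'.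
import Mathlib
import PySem

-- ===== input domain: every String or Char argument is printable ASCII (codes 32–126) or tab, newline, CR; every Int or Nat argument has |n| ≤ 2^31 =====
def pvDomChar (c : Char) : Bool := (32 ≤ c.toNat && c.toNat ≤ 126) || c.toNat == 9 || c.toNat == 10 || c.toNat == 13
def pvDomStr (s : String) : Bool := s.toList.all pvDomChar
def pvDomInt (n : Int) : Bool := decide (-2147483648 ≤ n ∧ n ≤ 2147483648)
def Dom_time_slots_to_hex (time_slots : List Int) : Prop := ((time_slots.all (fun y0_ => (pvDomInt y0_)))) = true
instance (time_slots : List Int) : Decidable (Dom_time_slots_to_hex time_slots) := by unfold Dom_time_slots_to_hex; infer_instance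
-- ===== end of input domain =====

-- B replaces A's OR-accumulation (with its empty-list guard) by a 16-slot boolean
-- array marked per slot and then folded high-to-low into the integer: an
-- alternative decomposition, same cost.

-- ===== PORT A =====
-- format(v, 'x') for Int v (exact for all Int; both Pythons call this builtin):
-- lowercase hex digits, no prefix, '-' sign for negatives.
def pvHexDigit (n : Nat) : Char := if n < 10 then Char.ofNat (48 + n) else Char.ofNat (87 + n)

def pvHexChars : Nat → List Char
  | 0 => []
  | n+1 => pvHexChars ((n+1) / 16) ++ [pvHexDigit ((n+1) % 16)]
decreasing_by exact Nat.div_lt_self (Nat.succ_pos n) (by norm_num)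

def pvFormatHex (v : Int) : String :=
  if v < 0 then String.ofList ('-' :: pvHexChars v.natAbs)
  else if v = 0 then "0"
  else String.ofList (pvHexChars v.toNat)

-- one step of A's loop: value |= (1 << (slot - 1)) for valid slots
def pvStepA (v : Int) (slot : Int) : Int :=
  if 1 ≤ slot ∧ slot ≤ 16 then PySem.Int.bor v ((1 : Int) <<< (slot - 1).toNat) else v

def time_slots_to_hex (time_slots : List Int) : String :=
  if time_slots = [] then "0"
  else pvFormatHex (time_slots.foldl pvStepA 0)

-- ===== PORT B =====
-- one step of B's marking loop: bits[slot - 1] = True for valid slots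
def pvMark (bits : List Bool) (slot : Int) : List Bool :=
  if 1 ≤ slot ∧ slot ≤ 16 then bits.set (slot - 1).toNat true else bits

-- one step of B's accumulation loop over reversed(bits)
def pvStepB (acc : Int) (bit : Bool) : Int := acc * 2 + (if bit then 1 else 0)

def time_slots_to_hex_alt (time_slots : List Int) : String :=
  let bits := time_slots.foldl pvMark (List.replicate 16 false)
  let value := bits.reverse.foldl pvStepB 0
  pvFormatHex value

-- ===== PRECONDITION & SPEC =====
def Spec_time_slots_to_hex (time_slots : List Int) (out : String) : Prop := out = time_slots_to_hex_alt time_slots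
instance (time_slots : List Int) (out : String) : Decidable (Spec_time_slots_to_hex time_slots out) := by unfold Spec_time_slots_to_hex; infer_instance

-- ===== CLAIM (what is proved, stated in full; the proofs are below) =====
def Claim_equal_time_slots_to_hex : Prop := ∀ (time_slots : List Int), Dom_time_slots_to_hex time_slots → Spec_time_slots_to_hex time_slots (time_slots_to_hex time_slots)

-- ===== LEMMAS AND PROOFS =====

-- value of a little-endian bit list
def pvBnum : List Bool → Nat
  | [] => 0
  | h :: t => (if h then 1 else 0) + 2 * pvBnum t

theorem pvTestBit_bnum (b : List Bool) : ∀ i, (pvBnum b).testBit i = b.getD i false := by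
  induction b with
  | nil => intro i; simp [pvBnum]
  | cons h t ih =>
    intro i
    cases i with
    | zero =>
      simp only [pvBnum, Nat.testBit_zero, List.getD_cons_zero]
      rcases h <;> simp
    | succ i =>
      rw [Nat.testBit_add_one]
      have : ((if h then 1 else 0) + 2 * pvBnum t) / 2 = pvBnum t := by rcases h <;> simp <;> omega
      simp only [pvBnum, this, List.getD_cons_succ, ih i]

theorem pvBnum_set (b : List Bool) (k : Nat) (hk : k < b.length) :
    pvBnum (b.set k true) = pvBnum b ||| (1 <<< k) := by
  apply Nat.eq_of_testBit_eq
  intro i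
  rw [Nat.testBit_lor, pvTestBit_bnum, pvTestBit_bnum, Nat.shiftLeft_eq, one_mul]
  by_cases h : k = i
  · subst h
    simp [List.getD, hk, Nat.testBit_two_pow_self]
  · simp [List.getD, h, Nat.testBit_two_pow_of_ne h]

theorem pvMark_length (ts : List Int) : ∀ b : List Bool, (ts.foldl pvMark b).length = b.length := by
  induction ts with
  | nil => intro b; rfl
  | cons s ts ih =>
    intro b
    rw [List.foldl_cons, ih]
    unfold pvMark
    split <;> simp

theorem pvShift_cast (k : Nat) : ((1 : Int) <<< k) = ((1 <<< k : Nat) : Int) := by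
  simp [Nat.shiftLeft_eq, Int.shiftLeft_eq]

theorem pvFoldA_eq (ts : List Int) : ∀ b : List Bool, b.length = 16 →
    ts.foldl pvStepA ((pvBnum b : Nat) : Int) = ((pvBnum (ts.foldl pvMark b) : Nat) : Int) := by
  induction ts with
  | nil => intro b _; rfl
  | cons s ts ih =>
    intro b hb
    rw [List.foldl_cons, List.foldl_cons]
    by_cases h : 1 ≤ s ∧ s ≤ 16
    · have hstep : pvStepA ((pvBnum b : Nat) : Int) s = ((pvBnum (pvMark b s) : Nat) : Int) := by
        unfold pvStepA pvMark
        rw [if_pos h, if_pos h, pvShift_cast, PySem.Int.bor_natCast,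
          pvBnum_set b (s - 1).toNat (by omega)]
      rw [hstep, ih (pvMark b s) (by unfold pvMark; split <;> simp [hb])]
    · have : pvStepA ((pvBnum b : Nat) : Int) s = ((pvBnum b : Nat) : Int) := by
        unfold pvStepA; rw [if_neg h]
      rw [this, show pvMark b s = b by unfold pvMark; rw [if_neg h], ih b hb]

theorem pvFoldB_eq (b : List Bool) : ∀ a : Int,
    b.reverse.foldl pvStepB a = a * 2 ^ b.length + (pvBnum b : Int) := by
  induction b with
  | nil => intro a; simp [pvBnum]
  | cons h t ih =>
    intro a
    rw [List.reverse_cons, List.foldl_append, ih]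
    simp only [List.foldl_cons, List.foldl_nil, pvStepB, pvBnum, List.length_cons]
    rcases h <;> push_cast <;> ring

-- ===== VERDICT (by name: the statement is the Claim_ definition above) =====
theorem time_slots_to_hex_spec : Claim_equal_time_slots_to_hex := by
  intro ts _
  unfold Spec_time_slots_to_hex time_slots_to_hex time_slots_to_hex_alt
  have hlen : (ts.foldl pvMark (List.replicate 16 false)).length = 16 := by
    rw [pvMark_length]; rfl
  have hB : (ts.foldl pvMark (List.replicate 16 false)).reverse.foldl pvStepB 0
      = ((pvBnum (ts.foldl pvMark (List.replicate 16 false)) : Nat) : Int) := by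
    rw [pvFoldB_eq, hlen]; ring
  have hA : ts.foldl pvStepA 0 = ((pvBnum (ts.foldl pvMark (List.replicate 16 false)) : Nat) : Int) := by
    have h0 : ((pvBnum (List.replicate 16 false) : Nat) : Int) = 0 := by decide
    rw [← h0, pvFoldA_eq ts (List.replicate 16 false) (by rfl)]
  by_cases hts : ts = []
  · subst hts; decide
  · rw [if_neg hts]
    simp only [hA, hB]
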